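-- pv_equiv track=rewrite | github.com/yangxvlin/comp90024-project2 | crawler/DB_Loader.py | word_length_distribution
-- ===== SOURCE A (Python) =====
-- def word_length_distribution(tokens):
--     short_thresh = 4
--     long_thresh = 8
--     word_length_keys = ['short_word_count', 'medium_word_count', 'long_word_count']
--
--     word_length = dict.fromkeys(word_length_keys, 0)
--     for token in tokens:
--         if len(token) <= short_thresh:
--             word_length['short_word_count'] += 1
--         elif len(token) > 8:
--             word_length['long_word_count'] += 1
--         else:
--             word_length['medium_word_count'] += 1
--     return word_length
-- ===== SOURCE B (Python) =====
-- def word_length_distribution(tokens):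
--     lst = list(tokens)
--     total = len(lst)
--     short = sum(1 for t in lst if len(t) <= 4)
--     long_ = sum(1 for t in lst if len(t) > 8)
--     return {'short_word_count': short,
--             'medium_word_count': total - short - long_,
--             'long_word_count': long_}
-- ===== Notes on version B (the rewrite author's own statement) =====
-- stated objective: simpler
-- what changed: Replaced A's single accumulating dict-update loop with independent counting passes (total via len, short/long via sum-comprehensions) and derived the medium count by subtraction, assembling the dict at once.
import Mathlib
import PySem

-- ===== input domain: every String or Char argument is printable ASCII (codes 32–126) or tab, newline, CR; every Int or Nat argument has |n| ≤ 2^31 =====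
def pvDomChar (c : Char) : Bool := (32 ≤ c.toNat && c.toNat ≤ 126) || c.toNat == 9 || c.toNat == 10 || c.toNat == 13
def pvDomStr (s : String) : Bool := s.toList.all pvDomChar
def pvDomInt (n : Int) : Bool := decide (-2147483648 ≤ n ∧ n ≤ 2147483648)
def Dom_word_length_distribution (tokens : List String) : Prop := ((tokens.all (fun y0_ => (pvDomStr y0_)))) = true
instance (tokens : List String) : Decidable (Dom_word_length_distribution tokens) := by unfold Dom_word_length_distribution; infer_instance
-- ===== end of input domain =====

-- B replaces A's single accumulating dict-update loop with independent counting passes and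
-- derives the medium count by subtraction (objective: simpler).

-- ===== PORT A =====
def word_length_distribution (tokens : List String) : List (String × Int) :=
  let shortThresh : Int := 4
  let _longThresh : Int := 8
  let wordLengthKeys : List String := ["short_word_count", "medium_word_count", "long_word_count"]
  -- dict.fromkeys(word_length_keys, 0)
  let wordLength : PySem.Dict String Int :=
    wordLengthKeys.foldl (fun d k => d.insert k 0) PySem.Dict.empty
  let final : PySem.Dict String Int :=
    tokens.foldl (fun d token =>
      if PySem.Str.len token ≤ shortThresh then
        d.modify "short_word_count" 0 (· + 1)
      else if PySem.Str.len token > 8 then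
        d.modify "long_word_count" 0 (· + 1)
      else
        d.modify "medium_word_count" 0 (· + 1)) wordLength
  final.items

-- ===== PORT B =====
def word_length_distribution_alt (tokens : List String) : List (String × Int) :=
  let lst := tokens
  let total : Int := PySem.List.len lst
  let short : Int := (lst.countP (fun t => PySem.Str.len t ≤ 4) : Int)
  let long : Int := (lst.countP (fun t => PySem.Str.len t > 8) : Int)
  [("short_word_count", short),
   ("medium_word_count", total - short - long),
   ("long_word_count", long)]

-- ===== PRECONDITION & SPEC =====
def Spec_word_length_distribution (tokens : List String) (out : List (String × Int)) : Prop := out = word_length_distribution_alt tokens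
instance (tokens : List String) (out : List (String × Int)) : Decidable (Spec_word_length_distribution tokens out) := by unfold Spec_word_length_distribution; infer_instance

-- ===== CLAIM (what is proved, stated in full; the proofs are below) =====
def Claim_equal_word_length_distribution : Prop := ∀ (tokens : List String), Dom_word_length_distribution tokens → Spec_word_length_distribution tokens (word_length_distribution tokens)

-- ===== LEMMAS AND PROOFS =====

-- Int-valued category counters used to characterise A's loop.
def pvCntS : List String → Int
  | [] => 0
  | t :: ts => (if PySem.Str.len t ≤ 4 then 1 else 0) + pvCntS ts

def pvCntM : List String → Int
  | [] => 0
  | t :: ts => (if ¬ PySem.Str.len t ≤ 4 ∧ ¬ PySem.Str.len t > 8 then 1 else 0) + pvCntM ts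

def pvCntL : List String → Int
  | [] => 0
  | t :: ts => (if PySem.Str.len t > 8 then 1 else 0) + pvCntL ts

-- Invariant of A's loop: starting from the three-key dict with counts (a, b, c),
-- the loop's items are those counts plus the three category counts of ts.
lemma wld_loop (ts : List String) (a b c : Int) :
    (ts.foldl (fun d token =>
        if PySem.Str.len token ≤ 4 then
          d.modify "short_word_count" 0 (· + 1)
        else if PySem.Str.len token > 8 then
          d.modify "long_word_count" 0 (· + 1)
        else
          d.modify "medium_word_count" 0 (· + 1))
      (PySem.Dict.mk [("short_word_count", a), ("medium_word_count", b), ("long_word_count", c)])).items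
    = [("short_word_count", a + pvCntS ts),
       ("medium_word_count", b + pvCntM ts),
       ("long_word_count", c + pvCntL ts)] := by
  induction ts generalizing a b c with
  | nil => simp [pvCntS, pvCntM, pvCntL]
  | cons t ts ih =>
    by_cases hs : PySem.Str.len t ≤ 4
    · have hstep : (PySem.Dict.mk [("short_word_count", a), ("medium_word_count", b), ("long_word_count", c)]).modify "short_word_count" 0 (· + 1)
          = PySem.Dict.mk [("short_word_count", a + 1), ("medium_word_count", b), ("long_word_count", c)] := by
        simp [PySem.Dict.modify, PySem.Dict.getD, PySem.Dict.get?, PySem.Dict.insert, PySem.Dict.contains]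
      simp only [List.foldl_cons, if_pos hs, hstep, ih]
      simp only [PySem.Str.len_eq, String.length_toList] at hs
      simp [pvCntS, pvCntM, pvCntL, String.length_toList]
      split_ifs <;> omega
    · by_cases hl : PySem.Str.len t > 8
      · have hstep : (PySem.Dict.mk [("short_word_count", a), ("medium_word_count", b), ("long_word_count", c)]).modify "long_word_count" 0 (· + 1)
            = PySem.Dict.mk [("short_word_count", a), ("medium_word_count", b), ("long_word_count", c + 1)] := by
          simp [PySem.Dict.modify, PySem.Dict.getD, PySem.Dict.get?, PySem.Dict.insert, PySem.Dict.contains]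
        simp only [List.foldl_cons, if_neg hs, if_pos hl, hstep, ih]
        simp only [PySem.Str.len_eq, String.length_toList] at hs hl
        simp [pvCntS, pvCntM, pvCntL, String.length_toList]
        split_ifs <;> omega
      · have hstep : (PySem.Dict.mk [("short_word_count", a), ("medium_word_count", b), ("long_word_count", c)]).modify "medium_word_count" 0 (· + 1)
            = PySem.Dict.mk [("short_word_count", a), ("medium_word_count", b + 1), ("long_word_count", c)] := by
          simp [PySem.Dict.modify, PySem.Dict.getD, PySem.Dict.get?, PySem.Dict.insert, PySem.Dict.contains]
        simp only [List.foldl_cons, if_neg hs, if_neg hl, hstep, ih]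
        simp only [PySem.Str.len_eq, String.length_toList] at hs hl
        simp [pvCntS, pvCntM, pvCntL, String.length_toList]
        split_ifs <;> omega

lemma pvCntS_eq (ts : List String) :
    pvCntS ts = (ts.countP (fun t => PySem.Str.len t ≤ 4) : Int) := by
  induction ts with
  | nil => simp [pvCntS]
  | cons t ts ih =>
    simp [pvCntS, List.countP_cons, ih]
    split_ifs <;> omega

lemma pvCntL_eq (ts : List String) :
    pvCntL ts = (ts.countP (fun t => PySem.Str.len t > 8) : Int) := by
  induction ts with
  | nil => simp [pvCntL]
  | cons t ts ih =>
    simp [pvCntL, List.countP_cons, ih]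
    split_ifs <;> omega

-- Each token falls in exactly one category, so medium = total - short - long.
lemma pvCntM_eq (ts : List String) :
    pvCntM ts = (ts.length : Int) - pvCntS ts - pvCntL ts := by
  induction ts with
  | nil => simp [pvCntS, pvCntM, pvCntL]
  | cons t ts ih =>
    simp [pvCntS, pvCntM, pvCntL, ih]
    split_ifs <;> omega

-- ===== VERDICT (by name: the statement is the Claim_ definition above) =====
theorem word_length_distribution_spec : Claim_equal_word_length_distribution := by
  intro tokens _
  unfold Spec_word_length_distribution word_length_distribution word_length_distribution_alt
  have hinit : (["short_word_count", "medium_word_count", "long_word_count"].foldl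
      (fun d k => d.insert k 0) (PySem.Dict.empty : PySem.Dict String Int))
      = PySem.Dict.mk [("short_word_count", (0:Int)), ("medium_word_count", 0), ("long_word_count", 0)] := by
    decide
  simp only [hinit, wld_loop, pvCntM_eq, pvCntS_eq, pvCntL_eq, PySem.List.len, zero_add]
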